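-- pv_equiv track=rewrite | github.com/Ahmed-Abouzeid/Label-Critic-TM | tmu/tsetlin_machine.py | remove_contradiction_0
-- ===== SOURCE A (Python) =====
-- import collections
--
-- def remove_contradiction_0(class_clauses_dict):
--     '''ensures that a class pos or neg clause has no contradicted literals. for example: x1 and not x1 in the same aggregated class clause either pos or neg.'''
--
--     all_literals = [l for c in class_clauses_dict.values() for l in c]
--     processed = []
--     contradicted = []
--     for l in collections.Counter(all_literals).items():
--         for l_ in collections.Counter(all_literals).items():
--             if l == l_:
--                 continue
--             if l[0][1:] == l_[0][1:] and l_[0] not in processed: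
--                 idx = [l[1], l_[1]].index(max([l[1], l_[1]]))
--                 if l[1] == l_[1]:
--                     contradicted.append(l[0])
--                     contradicted.append(l_[0])
--                     continue
--                 if idx == 0:
--                     processed.append(l[0])
--                 else:
--                     processed.append(l_[0])
--
--                 contradicted.append(l_[0])
--
--     for l in contradicted:
--         if l in all_literals:
--             all_literals.remove(l)
--
--     return set(all_literals)
-- ===== SOURCE B (Python) =====
-- import collections
--
-- def remove_contradiction_0(class_clauses_dict):
--     '''drop literals contradicted by an opposite literal with the same base (same string after the first character).'''
--     all_literals = [l for c in class_clauses_dict.values() for l in c]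
--     counts = collections.Counter(all_literals)
--     by_base = {}
--     for lit in counts:
--         by_base.setdefault(lit[1:], []).append(lit)
--     drops = collections.Counter()
--     for lits in by_base.values():
--         settled = set()
--         for a in lits:
--             for b in lits:
--                 if a == b or b in settled:
--                     continue
--                 if counts[a] == counts[b]:
--                     drops[a] += 1
--                     drops[b] += 1
--                 else:
--                     settled.add(a if counts[a] > counts[b] else b)
--                     drops[b] += 1
--     kept = []
--     for lit in all_literals:
--         if drops[lit] > 0:
--             drops[lit] -= 1
--         else:
--             kept.append(lit)
--     return set(kept)
-- ===== Notes on version B (the rewrite author's own statement) =====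
-- stated objective: faster
-- what changed: The Counter is built once instead of being rebuilt inside both nested loops, distinct literals are grouped by their stripped base in one dict pass, the pair logic runs only inside each group accumulating per-literal drop budgets, and the literal list is filtered in a single pass instead of repeated list.remove scans.
import Mathlib
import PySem

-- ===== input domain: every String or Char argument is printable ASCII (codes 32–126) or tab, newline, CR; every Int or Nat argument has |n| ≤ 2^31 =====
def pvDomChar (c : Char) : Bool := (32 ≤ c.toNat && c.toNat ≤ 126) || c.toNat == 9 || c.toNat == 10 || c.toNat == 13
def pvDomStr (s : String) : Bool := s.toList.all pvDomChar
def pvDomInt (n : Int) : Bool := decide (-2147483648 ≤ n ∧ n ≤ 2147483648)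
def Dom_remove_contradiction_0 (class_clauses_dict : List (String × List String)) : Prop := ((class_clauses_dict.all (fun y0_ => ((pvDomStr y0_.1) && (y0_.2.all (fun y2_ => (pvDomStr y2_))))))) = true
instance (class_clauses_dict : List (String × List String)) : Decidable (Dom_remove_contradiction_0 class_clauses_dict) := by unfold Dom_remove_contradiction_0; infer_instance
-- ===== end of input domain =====

-- B builds the Counter once, groups distinct literals by their stripped base, replays the pair
-- logic only inside each group as per-literal drop budgets, and filters the literal list in one
-- pass; equal return value proved on all inputs.

-- ===== PORT A =====
-- l[0][1:] — the literal with its first character stripped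
def pvTail (s : String) : String := PySem.Str.slice s (some 1) none

-- one iteration of A's nested pair loop; state = (processed, contradicted)
def pvStepA (l l_ : String × Int) (s : List String × List String) : List String × List String :=
  if l == l_ then s
  else if pvTail l.1 == pvTail l_.1 && !(s.1.contains l_.1) then
    -- idx = [l[1], l_[1]].index(max([l[1], l_[1]])); the .getD 0 defaults are unreachable
    -- (the two-element list is nonempty and contains its maximum)
    let idx := (PySem.List.index? [l.2, l_.2] ((PySem.List.max? [l.2, l_.2] (fun x => x)).getD 0)).getD 0
    if l.2 == l_.2 then (s.1, s.2 ++ [l.1, l_.1])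
    else if idx == 0 then (s.1 ++ [l.1], s.2 ++ [l_.1])
    else (s.1 ++ [l_.1], s.2 ++ [l_.1])
  else s

def remove_contradiction_0 (class_clauses_dict : List (String × List String)) : List String :=
  let all_literals := class_clauses_dict.flatMap (fun c => c.2)
  let st := ((PySem.Dict.counter all_literals).items).foldl
    (fun s l => ((PySem.Dict.counter all_literals).items).foldl (fun s l_ => pvStepA l l_ s) s)
    ([], [])
  let final := st.2.foldl
    (fun xs c => if xs.contains c then (PySem.List.remove? xs c).getD xs else xs) all_literals
  PySem.Set.ofList final

-- ===== PORT B =====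
-- one iteration of B's in-group pair loop; state = (settled set, drop counter)
def pvStepB (counts : PySem.Dict String Int) (a b : String)
    (s : PySem.Set String × PySem.Dict String Int) : PySem.Set String × PySem.Dict String Int :=
  if a == b || PySem.Set.contains s.1 b then s
  else
    let ca := counts.getD a 0
    let cb := counts.getD b 0
    if ca == cb then (s.1, ((s.2.modify a 0 (· + 1)).modify b 0 (· + 1)))
    else (PySem.Set.add s.1 (if ca > cb then a else b), s.2.modify b 0 (· + 1))

def remove_contradiction_0_alt (class_clauses_dict : List (String × List String)) : List String :=
  let all_literals := class_clauses_dict.flatMap (fun c => c.2)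
  let counts := PySem.Dict.counter all_literals
  let by_base := counts.keys.foldl
    (fun g lit => g.modify (pvTail lit) [] (fun v => v ++ [lit])) (PySem.Dict.empty)
  let drops := by_base.values.foldl
    (fun dr lits =>
      (lits.foldl (fun s a => lits.foldl (fun s b => pvStepB counts a b s) s)
        ((PySem.Set.empty : PySem.Set String), dr)).2)
    (PySem.Dict.empty)
  let fin := all_literals.foldl
    (fun (st : PySem.Dict String Int × List String) lit =>
      if st.1.getD lit 0 > 0 then (st.1.modify lit 0 (· - 1), st.2)
      else (st.1, st.2 ++ [lit]))
    (drops, [])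
  PySem.Set.ofList fin.2

-- ===== PRECONDITION & SPEC =====
def Spec_remove_contradiction_0 (class_clauses_dict : List (String × List String)) (out : List String) : Prop := out = remove_contradiction_0_alt class_clauses_dict
instance (class_clauses_dict : List (String × List String)) (out : List String) : Decidable (Spec_remove_contradiction_0 class_clauses_dict out) := by unfold Spec_remove_contradiction_0; infer_instance

-- ===== CLAIM (what is proved, stated in full; the proofs are below) =====
def Claim_equal_remove_contradiction_0 : Prop := ∀ (class_clauses_dict : List (String × List String)), Dom_remove_contradiction_0 class_clauses_dict → Spec_remove_contradiction_0 class_clauses_dict (remove_contradiction_0 class_clauses_dict)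

-- ===== LEMMAS AND PROOFS =====
abbrev pvEv : Type := (String × Int) × (String × Int)
abbrev pvSig : Type := (String → Bool) × (String → Nat)

def pvAStep (l l_ : String × Int) (σ : pvSig) : pvSig :=
  if l = l_ then σ
  else if pvTail l.1 = pvTail l_.1 ∧ σ.1 l_.1 = false then
    if l.2 = l_.2 then
      (σ.1, fun x => σ.2 x + (if l.1 == x then 1 else 0) + (if l_.1 == x then 1 else 0))
    else if l_.2 ≤ l.2 then
      (fun x => σ.1 x || (x == l.1), fun x => σ.2 x + (if l_.1 == x then 1 else 0))
    else
      (fun x => σ.1 x || (x == l_.1), fun x => σ.2 x + (if l_.1 == x then 1 else 0))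
  else σ

theorem pvIdx_eq (a b : Int) :
    ((PySem.List.index? [a,b] ((PySem.List.max? [a,b] (fun x => x)).getD 0)).getD 0)
      = if b ≤ a then 0 else 1 := by
  by_cases h : b ≤ a
  · simp [PySem.List.max?, PySem.List.index?, h, not_lt.mpr h, List.idxOf?, List.findIdx?,
      List.findIdx?.go]
  · have h' : a < b := not_le.mp h
    have hne : ¬ (a == b) = true := by simp [Int.ne_of_lt h']
    simp [PySem.List.max?, PySem.List.index?, h, h', List.idxOf?, List.findIdx?,
      List.findIdx?.go, hne]

theorem pvStepA_eq (l l_ : String × Int) (s : List String × List String) :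
    pvStepA l l_ s =
      if l = l_ then s
      else if pvTail l.1 = pvTail l_.1 ∧ s.1.contains l_.1 = false then
        if l.2 = l_.2 then (s.1, s.2 ++ [l.1, l_.1])
        else if l_.2 ≤ l.2 then (s.1 ++ [l.1], s.2 ++ [l_.1])
        else (s.1 ++ [l_.1], s.2 ++ [l_.1])
      else s := by
  unfold pvStepA
  rw [pvIdx_eq]
  by_cases he : l = l_
  · simp [he]
  · have heb : (l == l_) = false := by simpa using he
    by_cases ht : pvTail l.1 = pvTail l_.1
    · by_cases hm : s.1.contains l_.1
      · simp [heb, he, ht, hm]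
      · by_cases hc : l.2 = l_.2
        · simp [heb, he, ht, (by simpa using hm : l_.1 ∉ s.1), hc]
        · by_cases hle : l_.2 ≤ l.2 <;>
            simp [heb, he, ht, (by simpa using hm : l_.1 ∉ s.1), hc, hle]
    · simp [heb, ht]

def pvRA (s : List String × List String) (σ : pvSig) : Prop :=
  (∀ x, σ.1 x = s.1.contains x) ∧ (∀ x, σ.2 x = List.count x s.2)

theorem pvStepA_sim (l l_ : String × Int) (s : List String × List String) (σ : pvSig)
    (h : pvRA s σ) : pvRA (pvStepA l l_ s) (pvAStep l l_ σ) := by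
  obtain ⟨h1, h2⟩ := h
  rw [pvStepA_eq]
  unfold pvAStep
  by_cases he : l = l_
  · rw [if_pos he, if_pos he]; exact ⟨h1, h2⟩
  · rw [if_neg he, if_neg he]
    by_cases ht : pvTail l.1 = pvTail l_.1
    · by_cases hm : s.1.contains l_.1
      · have hgσ : ¬ (pvTail l.1 = pvTail l_.1 ∧ σ.1 l_.1 = false) := by
          rintro ⟨-, hx⟩; rw [h1, hm] at hx; cases hx
        have hgc : ¬ (pvTail l.1 = pvTail l_.1 ∧ s.1.contains l_.1 = false) := by
          rintro ⟨-, hx⟩; rw [hm] at hx; cases hx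
        rw [if_neg hgσ, if_neg hgc]; exact ⟨h1, h2⟩
      · have hm' : s.1.contains l_.1 = false := by simpa using hm
        have hσf : σ.1 l_.1 = false := (h1 l_.1).trans hm'
        rw [if_pos (⟨ht, hm'⟩ : pvTail l.1 = pvTail l_.1 ∧ s.1.contains l_.1 = false)]
        by_cases hc : l.2 = l_.2
        · rw [if_pos hc, if_pos (⟨ht, hσf⟩ : pvTail l.1 = pvTail l_.1 ∧ σ.1 l_.1 = false),
            if_pos hc]
          refine ⟨h1, fun x => ?_⟩
          dsimp only
          rw [h2 x]
          simp only [List.count_append, List.count_cons, List.count_nil, List.count_singleton]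
          split_ifs <;> omega
        · by_cases hle : l_.2 ≤ l.2
          · rw [if_neg hc, if_pos hle,
              if_pos (⟨ht, hσf⟩ : pvTail l.1 = pvTail l_.1 ∧ σ.1 l_.1 = false),
              if_neg hc, if_pos hle]
            refine ⟨fun x => ?_, fun x => ?_⟩
            · dsimp only; rw [h1 x]; simp [List.contains_append, beq_eq_decide]
            · dsimp only; rw [h2 x]
              simp only [List.count_append, List.count_singleton]
          · rw [if_neg hc, if_neg hle,
              if_pos (⟨ht, hσf⟩ : pvTail l.1 = pvTail l_.1 ∧ σ.1 l_.1 = false),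
              if_neg hc, if_neg hle]
            refine ⟨fun x => ?_, fun x => ?_⟩
            · dsimp only; rw [h1 x]; simp [List.contains_append, beq_eq_decide]
            · dsimp only; rw [h2 x]
              simp only [List.count_append, List.count_singleton]
    · have hgσ : ¬ (pvTail l.1 = pvTail l_.1 ∧ σ.1 l_.1 = false) := fun hx => ht hx.1
      have hgc : ¬ (pvTail l.1 = pvTail l_.1 ∧ s.1.contains l_.1 = false) := fun hx => ht hx.1
      rw [if_neg hgσ, if_neg hgc]; exact ⟨h1, h2⟩

def pvRun (evs : List pvEv) (σ : pvSig) : pvSig := evs.foldl (fun σ e => pvAStep e.1 e.2 σ) σ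

def pvSig0 : pvSig := (fun _ => false, fun _ => 0)

def pvEvents {α : Type} (items : List α) : List (α × α) :=
  items.flatMap (fun l => items.map (fun l_ => (l, l_)))

def pvRunAC (evs : List pvEv) (s : List String × List String) : List String × List String :=
  evs.foldl (fun s e => pvStepA e.1 e.2 s) s

theorem pvRunAC_sim (evs : List pvEv) (s : List String × List String) (σ : pvSig)
    (h : pvRA s σ) : pvRA (pvRunAC evs s) (pvRun evs σ) := by
  induction evs generalizing s σ with
  | nil => exact h
  | cons e evs ih => exact ih _ _ (pvStepA_sim e.1 e.2 s σ h)

-- ---------- projection onto one tail class ----------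
def pvAgree (σ τ : pvSig) (t : String) : Prop :=
  ∀ x, pvTail x = t → σ.1 x = τ.1 x ∧ σ.2 x = τ.2 x

theorem pvAStep_untouched (l l_ : String × Int) (σ : pvSig) (t : String)
    (h : pvTail l.1 ≠ t) :
    ∀ x, pvTail x = t → (pvAStep l l_ σ).1 x = σ.1 x ∧ (pvAStep l l_ σ).2 x = σ.2 x := by
  intro x hx
  unfold pvAStep
  by_cases he : l = l_
  · rw [if_pos he]; exact ⟨rfl, rfl⟩
  · rw [if_neg he]
    by_cases hg : pvTail l.1 = pvTail l_.1 ∧ σ.1 l_.1 = false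
    · have hx1 : x ≠ l.1 := fun hh => h (hh ▸ hx)
      have hx2 : x ≠ l_.1 := fun hh => h (by rw [hg.1, ← hh, hx])
      rw [if_pos hg]
      by_cases hc : l.2 = l_.2
      · rw [if_pos hc]
        exact ⟨rfl, by simp [hx1.symm, hx2.symm, beq_eq_decide]⟩
      · rw [if_neg hc]
        by_cases hle : l_.2 ≤ l.2
        · rw [if_pos hle]
          exact ⟨by simp [hx1, beq_eq_decide], by simp [hx2.symm, beq_eq_decide]⟩
        · rw [if_neg hle]
          exact ⟨by simp [hx2, beq_eq_decide], by simp [hx2.symm, beq_eq_decide]⟩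
    · rw [if_neg hg]; exact ⟨rfl, rfl⟩

theorem pvAStep_agree (l l_ : String × Int) (σ τ : pvSig) (t : String)
    (ht : pvTail l.1 = t) (h : pvAgree σ τ t) :
    pvAgree (pvAStep l l_ σ) (pvAStep l l_ τ) t := by
  intro x hx
  unfold pvAStep
  by_cases he : l = l_
  · rw [if_pos he, if_pos he]; exact h x hx
  · rw [if_neg he, if_neg he]
    by_cases htt : pvTail l.1 = pvTail l_.1
    · have hb : σ.1 l_.1 = τ.1 l_.1 := (h l_.1 (by rw [← htt, ht])).1
      by_cases hg : σ.1 l_.1 = false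
      · have hgτ : τ.1 l_.1 = false := by rw [← hb]; exact hg
        rw [if_pos (⟨htt, hg⟩ : pvTail l.1 = pvTail l_.1 ∧ σ.1 l_.1 = false),
          if_pos (⟨htt, hgτ⟩ : pvTail l.1 = pvTail l_.1 ∧ τ.1 l_.1 = false)]
        obtain ⟨e1, e2⟩ := h x hx
        by_cases hc : l.2 = l_.2
        · rw [if_pos hc, if_pos hc]; exact ⟨e1, by simp [e2]⟩
        · rw [if_neg hc, if_neg hc]
          by_cases hle : l_.2 ≤ l.2
          · rw [if_pos hle, if_pos hle]; exact ⟨by simp [e1], by simp [e2]⟩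
          · rw [if_neg hle, if_neg hle]; exact ⟨by simp [e1], by simp [e2]⟩
      · have hgτ : ¬ τ.1 l_.1 = false := by rw [← hb]; exact hg
        rw [if_neg (fun hh => hg hh.2), if_neg (fun hh => hgτ hh.2)]
        exact h x hx
    · rw [if_neg (fun hh => htt hh.1), if_neg (fun hh => htt hh.1)]
      exact h x hx

theorem pvRun_proj (t : String) (evs : List pvEv) (σ τ : pvSig) (h : pvAgree σ τ t) :
    pvAgree (pvRun evs σ) (pvRun (evs.filter (fun e => pvTail e.1.1 == t)) τ) t := by
  induction evs generalizing σ τ with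
  | nil => exact h
  | cons e evs ih =>
    by_cases he : pvTail e.1.1 = t
    · have hb : (pvTail e.1.1 == t) = true := by simpa using he
      simpa [pvRun, List.filter_cons, hb] using
        ih (pvAStep e.1 e.2 σ) (pvAStep e.1 e.2 τ) (pvAStep_agree e.1 e.2 σ τ t he h)
    · have hb : (pvTail e.1.1 == t) = false := by simpa using he
      simp only [pvRun, List.foldl_cons, List.filter_cons, hb, if_false]
      exact ih (pvAStep e.1 e.2 σ) τ (fun x hx =>
        ⟨((pvAStep_untouched e.1 e.2 σ t he x hx).1).trans (h x hx).1,
         ((pvAStep_untouched e.1 e.2 σ t he x hx).2).trans (h x hx).2⟩)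

theorem pvAStep_noop (l l_ : String × Int) (σ : pvSig) (h : pvTail l.1 ≠ pvTail l_.1) :
    pvAStep l l_ σ = σ := by
  unfold pvAStep
  rw [if_neg (fun hh : l = l_ => h (by rw [hh])), if_neg (fun hh => h hh.1)]

theorem pvRun_dropnoop2 (t : String) (evs : List pvEv) (σ : pvSig)
    (h : ∀ e ∈ evs, pvTail e.1.1 = t) :
    pvRun evs σ = pvRun (evs.filter (fun e => pvTail e.2.1 == t)) σ := by
  induction evs generalizing σ with
  | nil => rfl
  | cons e evs ih =>
    have h1 := h e (List.mem_cons_self)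
    by_cases he : pvTail e.2.1 = t
    · have hb : (pvTail e.2.1 == t) = true := by simpa using he
      simp only [pvRun, List.foldl_cons, List.filter_cons, hb, if_true]
      exact ih _ (fun e' he' => h e' (List.mem_cons_of_mem _ he'))
    · have hb : (pvTail e.2.1 == t) = false := by simpa using he
      simp only [pvRun, List.foldl_cons, List.filter_cons, hb, if_false]
      rw [pvAStep_noop e.1 e.2 σ (by rw [h1]; exact fun hh => he hh.symm)]
      exact ih σ (fun e' he' => h e' (List.mem_cons_of_mem _ he'))

theorem pvFilter_pair_map (a : String × Int) (B : List (String × Int))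
    (p q : (String × Int) → Bool) :
    ((B.map (fun l_ => (a, l_))).filter (fun e => p e.1)).filter (fun e => q e.2)
      = if p a then (B.filter q).map (fun l_ => (a, l_)) else [] := by
  rw [List.filter_map, List.filter_map]
  by_cases hp : p a
  · simp [Function.comp_def, hp]
  · simp [Function.comp_def, hp]

theorem pvEvents_filter_both (p q : (String × Int) → Bool) (A B : List (String × Int)) :
    ((A.flatMap (fun l => B.map (fun l_ => (l, l_)))).filter (fun e => p e.1)).filter
        (fun e => q e.2)
      = (A.filter p).flatMap (fun l => (B.filter q).map (fun l_ => (l, l_))) := by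
  induction A with
  | nil => rfl
  | cons a A ih =>
    simp only [List.flatMap_cons, List.filter_append, List.filter_cons]
    rw [pvFilter_pair_map a B p q, ih]
    by_cases hp : p a
    · simp [hp]
    · simp [hp]

def pvBlock (items : List (String × Int)) (t : String) : pvSig :=
  pvRun (pvEvents (items.filter (fun l => pvTail l.1 == t))) pvSig0

theorem pvRun_block (items : List (String × Int)) (x : String) :
    (pvRun (pvEvents items) pvSig0).2 x = (pvBlock items (pvTail x)).2 x := by
  have h1 := pvRun_proj (pvTail x) (pvEvents items) pvSig0 pvSig0 (fun _ _ => ⟨rfl, rfl⟩)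
  have h2 : ∀ e ∈ (pvEvents items).filter (fun e => pvTail e.1.1 == pvTail x),
      pvTail e.1.1 = pvTail x := by
    intro e he
    simpa using List.of_mem_filter he
  have h3 := pvRun_dropnoop2 (pvTail x) _ pvSig0 h2
  have h4 : (((pvEvents items).filter (fun e => pvTail e.1.1 == pvTail x)).filter
        (fun e => pvTail e.2.1 == pvTail x))
      = pvEvents (items.filter (fun l => pvTail l.1 == pvTail x)) :=
    pvEvents_filter_both (fun l => pvTail l.1 == pvTail x) (fun l => pvTail l.1 == pvTail x)
      items items
  rw [pvBlock, ← h4, ← h3]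
  exact (h1 x rfl).2

-- ---------- B-side simulation ----------
def pvPhi (all : List String) (k : String) : String × Int := (k, (List.count k all : Int))

def pvRB (s : PySem.Set String × PySem.Dict String Int) (σ : pvSig) : Prop :=
  (∀ x, σ.1 x = PySem.Set.contains s.1 x) ∧ (∀ x, (σ.2 x : Int) = s.2.getD x 0)

theorem pvContains_add (s : PySem.Set String) (c x : String) :
    PySem.Set.contains (PySem.Set.add s c) x = (PySem.Set.contains s x || (x == c)) := by
  rw [PySem.Set.contains_eq_decide, PySem.Set.contains_eq_decide]
  simp [PySem.Set.mem_add, beq_eq_decide]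

theorem pvGetD_modify_one (d : PySem.Dict String Int) (c x : String) :
    (d.modify c 0 (· + 1)).getD x 0 = d.getD x 0 + (if c == x then 1 else 0) := by
  rw [PySem.Dict.getD_modify]
  by_cases hx : x = c
  · simp [hx]
  · simp [hx, beq_eq_decide, Ne.symm hx]

theorem pvStepB_sim (all : List String) (a b : String) (hab : pvTail a = pvTail b)
    (s : PySem.Set String × PySem.Dict String Int) (σ : pvSig) (h : pvRB s σ) :
    pvRB (pvStepB (PySem.Dict.counter all) a b s)
      (pvAStep (pvPhi all a) (pvPhi all b) σ) := by
  obtain ⟨h1, h2⟩ := h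
  unfold pvStepB pvAStep pvPhi
  dsimp only
  by_cases he : a = b
  · have he' : ((a, (List.count a all : Int)) : String × Int) = (b, (List.count b all : Int)) := by
      rw [he]
    have hg : (a == b || PySem.Set.contains s.1 b) = true := by simp [he]
    rw [if_pos he', hg, if_pos rfl]
    exact ⟨h1, h2⟩
  · have he' : ¬ ((a, (List.count a all : Int)) : String × Int) = (b, (List.count b all : Int)) :=
      fun hh => he (congrArg Prod.fst hh)
    rw [if_neg he']
    by_cases hm : PySem.Set.contains s.1 b
    · have hmem : b ∈ s.1 := (PySem.Set.contains_iff s.1 b).mp hm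
      have hg : (a == b || PySem.Set.contains s.1 b) = true := by simp [hmem]
      rw [hg, if_pos rfl]
      rw [if_neg (fun hh : _ ∧ σ.1 b = false => by rw [h1 b, hm] at hh; cases hh.2)]
      exact ⟨h1, h2⟩
    · have hm' : PySem.Set.contains s.1 b = false := by simpa using hm
      have hnm : b ∉ s.1 := fun hbm => hm (((PySem.Set.contains_iff s.1 b).mpr hbm))
      have hg : (a == b || PySem.Set.contains s.1 b) = false := by simp [he, hnm]
      rw [hg, if_neg (by simp : ¬ (false = true)),
        if_pos (⟨hab, (h1 b).trans hm'⟩ : pvTail a = pvTail b ∧ σ.1 b = false)]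
      simp only [PySem.Dict.getD_counter]
      by_cases hc : (List.count a all : Int) = (List.count b all : Int)
      · have hcb : (((List.count a all : Int)) == ((List.count b all : Int))) = true := by
          simpa using hc
        rw [hcb, if_pos rfl, if_pos hc]
        refine ⟨h1, fun x => ?_⟩
        dsimp only
        rw [pvGetD_modify_one, pvGetD_modify_one, ← h2 x]
        push_cast
        split_ifs <;> omega
      · have hcb : (((List.count a all : Int)) == ((List.count b all : Int))) = false := by
          simpa using hc
        rw [hcb, if_neg (by simp : ¬ (false = true)), if_neg hc]
        by_cases hle : (List.count b all : Int) ≤ (List.count a all : Int)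
        · have hgt : ((List.count a all : Int) > (List.count b all : Int)) := by omega
          rw [if_pos hgt, if_pos hle]
          refine ⟨fun x => ?_, fun x => ?_⟩
          · dsimp only
            rw [pvContains_add, h1 x]
          · dsimp only
            rw [pvGetD_modify_one, ← h2 x]
            push_cast
            split_ifs <;> omega
        · have hgt : ¬ ((List.count a all : Int) > (List.count b all : Int)) := by omega
          rw [if_neg hgt, if_neg hle]
          refine ⟨fun x => ?_, fun x => ?_⟩
          · dsimp only
            rw [pvContains_add, h1 x]
          · dsimp only
            rw [pvGetD_modify_one, ← h2 x]
            push_cast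
            split_ifs <;> omega

theorem pvNested_eq {α β : Type} (items : List α) (f : α → α → β → β) (s0 : β) :
    items.foldl (fun s l => items.foldl (fun s l_ => f l l_ s) s) s0
      = (pvEvents items).foldl (fun s e => f e.1 e.2 s) s0 := by
  unfold pvEvents
  rw [List.foldl_flatMap]
  refine PySem.List.foldl_congr_mem _ _ _ _ (fun acc l _ => ?_)
  rw [List.foldl_map]

theorem pvEvents_map {α β : Type} (f : α → β) (l : List α) :
    pvEvents (l.map f) = (pvEvents l).map (fun e => (f e.1, f e.2)) := by
  simp [pvEvents, List.map_flatMap, List.flatMap_map, List.map_map, Function.comp_def]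

theorem pvRunB_sim (all : List String) (evs : List (String × String))
    (htails : ∀ e ∈ evs, pvTail e.1 = pvTail e.2)
    (s : PySem.Set String × PySem.Dict String Int) (σ : pvSig) (h : pvRB s σ) :
    pvRB (evs.foldl (fun s e => pvStepB (PySem.Dict.counter all) e.1 e.2 s) s)
      (pvRun (evs.map (fun e => (pvPhi all e.1, pvPhi all e.2))) σ) := by
  induction evs generalizing s σ with
  | nil => exact h
  | cons e evs ih =>
    simp only [List.foldl_cons, List.map_cons, pvRun, List.foldl_cons]
    exact ih (fun e' he' => htails e' (List.mem_cons_of_mem _ he')) _ _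
      (pvStepB_sim all e.1 e.2 (htails e List.mem_cons_self) s σ h)

theorem pvRun_untouched (evs : List pvEv) (σ : pvSig) (x : String)
    (h : ∀ e ∈ evs, pvTail e.1.1 ≠ pvTail x) :
    (pvRun evs σ).1 x = σ.1 x ∧ (pvRun evs σ).2 x = σ.2 x := by
  induction evs generalizing σ with
  | nil => exact ⟨rfl, rfl⟩
  | cons e evs ih =>
    have hu := pvAStep_untouched e.1 e.2 σ (pvTail x) (h e List.mem_cons_self) x rfl
    have := ih (pvAStep e.1 e.2 σ) (fun e' he' => h e' (List.mem_cons_of_mem _ he'))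
    exact ⟨this.1.trans hu.1, this.2.trans hu.2⟩

theorem pvMem_pvEvents {α : Type} (l : List α) (e : α × α) (h : e ∈ pvEvents l) :
    e.1 ∈ l ∧ e.2 ∈ l := by
  simp only [pvEvents, List.mem_flatMap, List.mem_map] at h
  obtain ⟨a, ha, b, hb, rfl⟩ := h
  exact ⟨ha, hb⟩

-- by_base of B: values are the per-tail key groups, in order of first appearance of a tail
theorem pvGroups_values (all : List String) :
    ((PySem.Set.ofList all).foldl
        (fun g lit => g.modify (pvTail lit) [] (fun v => v ++ [lit]))
        (PySem.Dict.empty : PySem.Dict String (List String))).values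
      = (PySem.Set.ofList ((PySem.Set.ofList all).map pvTail)).map
          (fun t => (PySem.Set.ofList all).filter (fun k => pvTail k == t)) := by
  have hkeys : ((PySem.Set.ofList all).foldl
        (fun g lit => g.modify (pvTail lit) [] (fun v => v ++ [lit]))
        (PySem.Dict.empty : PySem.Dict String (List String))).keys
      = PySem.Set.ofList ((PySem.Set.ofList all).map pvTail) := by
    rw [PySem.Dict.keys_foldl_modify_key (PySem.Set.ofList all) pvTail []
      (fun _ x => (fun v => v ++ [x])) PySem.Dict.empty]
    rw [PySem.Dict.keys_empty]
    rw [PySem.Set.update_nil_left]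
  have hnd : ((PySem.Set.ofList all).foldl
        (fun g lit => g.modify (pvTail lit) [] (fun v => v ++ [lit]))
        (PySem.Dict.empty : PySem.Dict String (List String))).keys.Nodup := by
    exact PySem.Dict.nodup_keys_foldl_modify_key _ pvTail []
      (fun _ x => (fun v => v ++ [x])) _ (PySem.Dict.nodup_keys_empty)
  rw [PySem.Dict.values_eq_map_keys _ hnd [], hkeys]
  refine List.map_congr_left (fun t _ => ?_)
  have hfold : (PySem.Set.ofList all).foldl
        (fun g lit => g.modify (pvTail lit) [] (fun v => v ++ [lit]))
        (PySem.Dict.empty : PySem.Dict String (List String))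
      = ((PySem.Set.ofList all).map (fun k => (pvTail k, k))).foldl
        (fun d p => d.modify p.1 [] (fun v => v ++ [p.2])) PySem.Dict.empty := by
    rw [List.foldl_map]
  rw [hfold, PySem.Dict.getD_foldl_modify_append, PySem.Dict.getD_empty, List.nil_append,
    List.filter_map, List.map_map]
  simp [Function.comp_def]

def pvInner (all : List String) (g : List String) (rm : PySem.Dict String Int) :
    PySem.Dict String Int :=
  (g.foldl (fun s a => g.foldl (fun s b => pvStepB (PySem.Dict.counter all) a b s) s)
    ((PySem.Set.empty : PySem.Set String), rm)).2

def pvGrp (all : List String) (t : String) : List String :=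
  (PySem.Set.ofList all).filter (fun k => pvTail k == t)

def pvM (all : List String) (x : String) : Nat :=
  (pvBlock ((PySem.Dict.counter all).items) (pvTail x)).2 x

theorem pvItems_filter (all : List String) (t : String) :
    ((PySem.Dict.counter all).items).filter (fun l => pvTail l.1 == t)
      = (pvGrp all t).map (pvPhi all) := by
  rw [PySem.Dict.items_counter, List.filter_map]
  simp [Function.comp_def, pvGrp, pvPhi]

theorem pvInner_spec (all : List String) (t : String) (rm : PySem.Dict String Int)
    (ρ : String → Nat) (hρ : ∀ y, (ρ y : Int) = rm.getD y 0)
    (hρt : ∀ y, pvTail y = t → ρ y = 0) :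
    ∀ y, (pvInner all (pvGrp all t) rm).getD y 0
      = if pvTail y = t then (pvM all y : Int) else (ρ y : Int) := by
  intro y
  unfold pvInner
  rw [pvNested_eq (pvGrp all t) (fun a b s => pvStepB (PySem.Dict.counter all) a b s)]
  have htails : ∀ e ∈ pvEvents (pvGrp all t), pvTail e.1 = pvTail e.2 := by
    intro e he
    obtain ⟨h1, h2⟩ := pvMem_pvEvents _ e he
    have e1 : (pvTail e.1 == t) = true := (List.mem_filter.mp h1).2
    have e2 : (pvTail e.2 == t) = true := (List.mem_filter.mp h2).2
    rw [beq_iff_eq] at e1 e2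
    rw [e1, e2]
  have h0 : pvRB ((PySem.Set.empty : PySem.Set String), rm) (fun _ => false, ρ) := by
    refine ⟨fun x => ?_, hρ⟩
    simp [PySem.Set.empty, PySem.Set.contains_eq_decide]
  have hsim := pvRunB_sim all (pvEvents (pvGrp all t)) htails _ _ h0
  rw [← (hsim.2 y)]
  have hEt : (pvEvents (pvGrp all t)).map (fun e => (pvPhi all e.1, pvPhi all e.2))
      = pvEvents (((PySem.Dict.counter all).items).filter (fun l => pvTail l.1 == t)) := by
    rw [pvItems_filter, pvEvents_map]
  have htails1 : ∀ e ∈ (pvEvents (pvGrp all t)).map (fun e => (pvPhi all e.1, pvPhi all e.2)),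
      pvTail e.1.1 = t := by
    intro e he
    obtain ⟨e', he', rfl⟩ := List.mem_map.mp he
    have := (List.mem_filter.mp (pvMem_pvEvents _ e' he').1).2
    rw [beq_iff_eq] at this
    simpa [pvPhi] using this
  by_cases hy : pvTail y = t
  · rw [if_pos hy]
    have hagree : pvAgree (fun _ => false, ρ) pvSig0 t := by
      intro z hz
      exact ⟨rfl, hρt z hz⟩
    have hproj := pvRun_proj t ((pvEvents (pvGrp all t)).map
        (fun e => (pvPhi all e.1, pvPhi all e.2))) _ _ hagree
    have hfs : ((pvEvents (pvGrp all t)).map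
          (fun e => (pvPhi all e.1, pvPhi all e.2))).filter (fun e => pvTail e.1.1 == t)
        = (pvEvents (pvGrp all t)).map (fun e => (pvPhi all e.1, pvPhi all e.2)) := by
      refine List.filter_eq_self.mpr (fun e he => ?_)
      simpa using htails1 e he
    rw [hfs] at hproj
    have := (hproj y hy).2
    rw [this]
    unfold pvM pvBlock
    rw [hy, hEt]
  · rw [if_neg hy]
    have hunt := pvRun_untouched ((pvEvents (pvGrp all t)).map
        (fun e => (pvPhi all e.1, pvPhi all e.2))) (fun _ => false, ρ) y
      (fun e he => by rw [htails1 e he]; exact fun hh => hy hh.symm)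
    rw [hunt.2]

theorem pvOuter (all : List String) (ts : List String) (done : List String)
    (hnd : (done ++ ts).Nodup) (rm : PySem.Dict String Int)
    (hinv : ∀ x, rm.getD x 0 = if pvTail x ∈ done then (pvM all x : Int) else 0) :
    ∀ x, (ts.foldl (fun rm t => pvInner all (pvGrp all t) rm) rm).getD x 0
      = if pvTail x ∈ done ++ ts then (pvM all x : Int) else 0 := by
  induction ts generalizing done rm with
  | nil => simpa using hinv
  | cons t ts ih =>
    have htdone : t ∉ done := fun hmem =>
      (List.disjoint_of_nodup_append hnd) hmem List.mem_cons_self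
    have hstep := pvInner_spec all t rm
      (fun y => if pvTail y ∈ done then pvM all y else 0)
      (fun y => by
        show ((if pvTail y ∈ done then pvM all y else 0 : Nat) : Int) = rm.getD y 0
        rw [hinv y]
        by_cases hm : pvTail y ∈ done
        · simp [hm]
        · simp [hm])
      (fun y hy => by
        show (if pvTail y ∈ done then pvM all y else 0) = 0
        rw [hy]
        simp [htdone])
    have hinv' : ∀ x, (pvInner all (pvGrp all t) rm).getD x 0
        = if pvTail x ∈ done ++ [t] then (pvM all x : Int) else 0 := by
      intro x
      rw [hstep x]
      by_cases hx : pvTail x = t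
      · simp [hx]
      · simp only [List.mem_append, List.mem_singleton, hx, or_false]
        by_cases hm : pvTail x ∈ done
        · simp [hm]
        · simp [hm]
    have hnd' : ((done ++ [t]) ++ ts).Nodup := by
      rw [List.append_assoc]
      simpa using hnd
    intro x
    have := ih (done ++ [t]) hnd' _ hinv' x
    simp only [List.foldl_cons]
    rw [this]
    by_cases hx : pvTail x ∈ done ++ t :: ts
    · rw [if_pos hx]
      rw [if_pos (by simpa [List.mem_append, or_assoc] using hx)]
    · rw [if_neg hx]
      rw [if_neg (by simpa [List.mem_append, or_assoc] using hx)]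

theorem pvM_zero_of_not_mem (all : List String) (x : String)
    (h : pvTail x ∉ PySem.Set.ofList ((PySem.Set.ofList all).map pvTail)) :
    pvM all x = 0 := by
  have hfil : (pvGrp all (pvTail x)) = [] := by
    refine List.filter_eq_nil_iff.mpr (fun k hk => ?_)
    intro hbeq
    exact h ((PySem.Set.mem_ofList _ _).mpr
      (List.mem_map.mpr ⟨k, hk, by simpa using hbeq⟩))
  unfold pvM pvBlock
  rw [pvItems_filter, hfil]
  rfl

theorem pvRemovals_getD (all : List String) :
    ∀ x, ((((PySem.Dict.counter all).keys.foldl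
        (fun g lit => g.modify (pvTail lit) [] (fun v => v ++ [lit]))
        (PySem.Dict.empty : PySem.Dict String (List String))).values).foldl
      (fun rm lits =>
        (lits.foldl (fun s a => lits.foldl
            (fun s b => pvStepB (PySem.Dict.counter all) a b s) s)
          ((PySem.Set.empty : PySem.Set String), rm)).2)
      (PySem.Dict.empty : PySem.Dict String Int)).getD x 0 = (pvM all x : Int) := by
  intro x
  rw [PySem.Dict.keys_counter, pvGroups_values, List.foldl_map]
  have h := pvOuter all (PySem.Set.ofList ((PySem.Set.ofList all).map pvTail)) []
    (by simpa using PySem.Set.nodup_ofList _)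
    (PySem.Dict.empty : PySem.Dict String Int)
    (fun y => by simp [PySem.Dict.getD_empty])
  have hx := h x
  simp only [List.nil_append] at hx
  unfold pvInner pvGrp at hx
  rw [hx]
  by_cases hm : pvTail x ∈ PySem.Set.ofList ((PySem.Set.ofList all).map pvTail)
  · rw [if_pos hm]
  · rw [if_neg hm, pvM_zero_of_not_mem all x hm]
    simp

-- ---------- removal phase ----------
theorem pvEraseIf (xs : List String) (c : String) :
    (if xs.contains c then (PySem.List.remove? xs c).getD xs else xs) = xs.erase c := by
  by_cases hm : c ∈ xs
  · rw [if_pos (by simpa using hm), PySem.List.remove?_eq_some_erase xs c hm]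
    rfl
  · rw [if_neg (by simpa using hm), List.erase_of_not_mem hm]

theorem pvFoldl_eraseIf_eq_diff (cs xs : List String) :
    cs.foldl (fun xs c => if xs.contains c then (PySem.List.remove? xs c).getD xs else xs) xs
      = xs.diff cs := by
  rw [List.diff_eq_foldl]
  exact PySem.List.foldl_congr_mem _ _ _ _ (fun acc c _ => pvEraseIf acc c)

-- skip the first r x occurrences of each x (B's one-pass filter, functionally)
def pvSkip : List String → (String → Nat) → List String
  | [], _ => []
  | x :: xs, r =>
    if r x > 0 then pvSkip xs (fun y => if y = x then r y - 1 else r y)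
    else x :: pvSkip xs r

theorem pvSkip_eq_diff (xs : List String) : ∀ (cs : List String) (r : String → Nat),
    (∀ x, List.count x cs = r x) → pvSkip xs r = xs.diff cs := by
  induction xs with
  | nil => intro cs r _; simp [pvSkip]
  | cons x xs ih =>
    intro cs r h
    by_cases hx : r x > 0
    · have hmem : x ∈ cs := by
        rw [← List.count_pos_iff, h x]; exact hx
      rw [pvSkip, if_pos hx, List.cons_diff, if_pos hmem]
      refine ih (cs.erase x) _ (fun y => ?_)
      rw [List.count_erase]
      by_cases hy : y = x
      · simp [hy, ← h x]
      · simp [hy, (Ne.symm hy : x ≠ y), beq_eq_decide, h y]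
    · have hmem : x ∉ cs := by
        intro hm
        exact hx (by rw [← h x] at *; exact List.count_pos_iff.mpr hm)
      rw [pvSkip, if_neg hx, List.cons_diff, if_neg hmem, ih cs r h]

theorem pvFoldSkip (xs : List String) : ∀ (d : PySem.Dict String Int) (ρ : String → Nat)
    (_ : ∀ x, (ρ x : Int) = d.getD x 0) (acc : List String),
    (xs.foldl (fun (st : PySem.Dict String Int × List String) lit =>
        if st.1.getD lit 0 > 0 then (st.1.modify lit 0 (· - 1), st.2)
        else (st.1, st.2 ++ [lit])) (d, acc)).2
      = acc ++ pvSkip xs ρ := by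
  induction xs with
  | nil => intro d ρ _ acc; simp [pvSkip]
  | cons x xs ih =>
    intro d ρ hρ acc
    by_cases hx : ρ x > 0
    · have hd : d.getD x 0 > 0 := by rw [← hρ x]; exact_mod_cast hx
      rw [List.foldl_cons, if_pos hd, pvSkip, if_pos hx]
      refine ih _ (fun y => if y = x then ρ y - 1 else ρ y) (fun y => ?_) acc
      dsimp only
      rw [PySem.Dict.getD_modify]
      by_cases hy : y = x
      · subst hy
        rw [if_pos rfl, if_pos rfl, ← hρ y]
        push_cast
        omega
      · rw [if_neg hy, if_neg hy, hρ y]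
    · have hd : ¬ d.getD x 0 > 0 := by rw [← hρ x]; exact_mod_cast hx
      rw [List.foldl_cons, if_neg hd, pvSkip, if_neg hx, ih d ρ hρ (acc ++ [x])]
      simp

theorem pv_core (all : List String) :
    PySem.Set.ofList
      (((((PySem.Dict.counter all).items).foldl
          (fun s l => ((PySem.Dict.counter all).items).foldl (fun s l_ => pvStepA l l_ s) s)
          (([], []) : List String × List String)).2).foldl
        (fun xs c => if xs.contains c then (PySem.List.remove? xs c).getD xs else xs) all)
    = PySem.Set.ofList
      ((all.foldl
        (fun (st : PySem.Dict String Int × List String) lit =>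
          if st.1.getD lit 0 > 0 then (st.1.modify lit 0 (· - 1), st.2)
          else (st.1, st.2 ++ [lit]))
        ((((PySem.Dict.counter all).keys.foldl
            (fun g lit => g.modify (pvTail lit) [] (fun v => v ++ [lit]))
            (PySem.Dict.empty : PySem.Dict String (List String))).values).foldl
          (fun rm lits =>
            (lits.foldl (fun s a => lits.foldl
                (fun s b => pvStepB (PySem.Dict.counter all) a b s) s)
              ((PySem.Set.empty : PySem.Set String), rm)).2)
          (PySem.Dict.empty : PySem.Dict String Int), ([] : List String))).2) := by
  congr 1
  rw [pvFoldl_eraseIf_eq_diff]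
  rw [pvFoldSkip all _ (fun x => pvM all x) (fun x => (pvRemovals_getD all x).symm) []]
  rw [List.nil_append]
  refine (pvSkip_eq_diff all _ (fun x => pvM all x) (fun x => ?_)).symm
  -- count of x in A's contradicted list is pvM all x
  rw [pvNested_eq ((PySem.Dict.counter all).items) (fun l l_ s => pvStepA l l_ s)] at *
  have hsim := pvRunAC_sim (pvEvents ((PySem.Dict.counter all).items)) ([], []) pvSig0
    ⟨fun _ => rfl, fun _ => rfl⟩
  unfold pvRunAC at hsim
  rw [← hsim.2 x, pvRun_block]
  rfl

theorem pv_final (ccd : List (String × List String)) :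
    remove_contradiction_0 ccd = remove_contradiction_0_alt ccd := by
  simp only [remove_contradiction_0, remove_contradiction_0_alt]
  exact pv_core (ccd.flatMap (fun c => c.2))

-- ===== VERDICT (by name: the statement is the Claim_ definition above) =====
theorem remove_contradiction_0_spec : Claim_equal_remove_contradiction_0 := by
  intro class_clauses_dict _
  unfold Spec_remove_contradiction_0
  exact pv_final class_clauses_dict
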